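-- pv_equiv track=rewrite | github.com/miliar/Code_Jam_Webscraper | solutions_python/solutions_year16_round0_nr2/4512.py | generate
-- ===== SOURCE A (Python) =====
-- def generate(state):
-- 	new_states = []
-- 	lenOfState = len(state)
-- 	for i in range(1,lenOfState+1):
-- 		new_state = ""
-- 		for j in range(0, i):
-- 			if state[j] == '+':
-- 				new_state = new_state + '-'
-- 			else:
-- 				new_state = new_state + '+'
-- 		new_state = new_state + state[i:lenOfState]
-- 		new_states.append(new_state)
--
-- 	return new_states
-- ===== SOURCE B (Python) =====
-- def generate(state):
--     flipped = ''.join('-' if c == '+' else '+' for c in state)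
--     return [flipped[:i] + state[i:] for i in range(1, len(state) + 1)]
-- ===== Notes on version B (the rewrite author's own statement) =====
-- stated objective: faster
-- what changed: B precomputes the fully flipped string once and builds each result by slicing it, removing A's per-prefix re-flipping inner loop.
import Mathlib
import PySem

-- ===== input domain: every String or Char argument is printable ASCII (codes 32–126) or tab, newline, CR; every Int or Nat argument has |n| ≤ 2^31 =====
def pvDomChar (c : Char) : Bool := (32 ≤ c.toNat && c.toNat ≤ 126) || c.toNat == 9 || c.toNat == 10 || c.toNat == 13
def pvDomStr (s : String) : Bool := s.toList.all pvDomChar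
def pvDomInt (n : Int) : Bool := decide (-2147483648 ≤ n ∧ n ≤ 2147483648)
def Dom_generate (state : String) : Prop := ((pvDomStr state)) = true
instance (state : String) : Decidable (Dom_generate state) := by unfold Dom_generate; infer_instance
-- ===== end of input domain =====

-- B precomputes the whole flipped string once and slices it, removing A's per-prefix re-flipping inner loop (constant-factor speedup).

-- ===== PORT A =====
def generate (state : String) : List String :=
  let cs := state.toList
  let lenOfState : Int := cs.length
  (PySem.List.pyRange 1 (lenOfState + 1) 1).foldl (fun new_states i =>
    let new_state : List Char :=
      (PySem.List.pyRange 0 i 1).foldl (fun ns j =>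
        match PySem.List.pyGet? cs j with
        | some c => if c = '+' then ns ++ ['-'] else ns ++ ['+']
        | none => ns) []
    new_states ++ [String.ofList (new_state ++ PySem.List.slice cs (some i) (some lenOfState))]) []

-- ===== PORT B =====
def generate_alt (state : String) : List String :=
  let cs := state.toList
  let flipped := cs.map (fun c => if c = '+' then '-' else '+')
  (PySem.List.pyRange 1 ((cs.length : Int) + 1) 1).foldl (fun acc i =>
    acc ++ [String.ofList (PySem.List.slice flipped none (some i) ++
                       PySem.List.slice cs (some i) (some (cs.length : Int)))]) []

-- ===== PRECONDITION & SPEC =====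
def Spec_generate (state : String) (out : List String) : Prop := out = generate_alt state
instance (state : String) (out : List String) : Decidable (Spec_generate state out) := by unfold Spec_generate; infer_instance

-- ===== CLAIM (what is proved, stated in full; the proofs are below) =====
def Claim_equal_generate : Prop := ∀ (state : String), Dom_generate state → Spec_generate state (generate state)

-- ===== LEMMAS AND PROOFS =====

-- A's inner per-prefix flipping loop produces exactly the first k characters of B's precomputed flip.
theorem inner_eq_take_map (cs : List Char) (k : Nat) (hk : k ≤ cs.length) :
    (PySem.List.pyRange 0 (k : Int) 1).foldl (fun ns j =>
      match PySem.List.pyGet? cs j with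
      | some c => if c = '+' then ns ++ ['-'] else ns ++ ['+']
      | none => ns) [] =
    (cs.take k).map (fun c => if c = '+' then '-' else '+') := by
  induction k with
  | zero => simp [PySem.List.pyRange]
  | succ k ih =>
    have hk' : k ≤ cs.length := Nat.le_of_succ_le hk
    have hlt : k < cs.length := hk
    rw [show ((k + 1 : Nat) : Int) = (k : Int) + 1 by push_cast; ring,
        PySem.List.pyRange_one_succ_right (by omega), List.foldl_append, ih hk']
    have hget : PySem.List.pyGet? cs (k : Int) = some cs[k] := by
      simp [PySem.List.pyGet?_natCast, List.getElem?_eq_getElem hlt]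
    simp only [List.foldl_cons, List.foldl_nil, hget]
    rw [show List.take (k+1) cs = List.take k cs ++ [cs[k]] from by
          rw [List.take_add_one, List.getElem?_eq_getElem hlt]; simp,
        List.map_append]
    by_cases h : cs[k] = '+' <;> simp [h]

-- ===== VERDICT (by name: the statement is the Claim_ definition above) =====
theorem generate_spec : Claim_equal_generate := by
  intro state _
  unfold Spec_generate generate generate_alt
  rw [PySem.List.foldl_append_singleton_eq_map, PySem.List.foldl_append_singleton_eq_map]
  apply List.map_congr_left
  intro i hi
  have hmem := (PySem.List.mem_pyRange_one.mp hi)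
  set cs := state.toList with hcs
  obtain ⟨h1, h2⟩ := hmem
  have hi0 : 0 ≤ i := by omega
  have hk : i = ((i.toNat : Nat) : Int) := by omega
  have hkle : i.toNat ≤ cs.length := by omega
  congr 1
  rw [hk, inner_eq_take_map cs i.toNat hkle, PySem.List.slice_to_natCast, List.map_take]
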